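-- pv_equiv track=rewrite | github.com/apollis4/Decoding-spatial-positions | Scripts_detection_sequence replay.py | transform_nb_trials_from_events
-- ===== SOURCE A (Python) =====
-- def transform_nb_trials_from_events(nb_trials, events):
--     """
--     Input:
--         - nb_trials: number of trials to select for each class
--         - events: list of events
--
--     Output:
--         - list_trials_to_select: list of boolean to select the trials
--     """
--     unique_class = list(set(events))
--     list_trials_to_select = []
--     dictionary_nb_trials_for_each_class = {unique_class[i]: 0 for i in range(len(unique_class))}
--     for i in range(len(events)):
--         if dictionary_nb_trials_for_each_class[events[i]] < nb_trials:
--             dictionary_nb_trials_for_each_class[events[i]] += 1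
--             list_trials_to_select.append(True)
--         else:
--             list_trials_to_select.append(False)
--     return list_trials_to_select
-- ===== SOURCE B (Python) =====
-- def transform_nb_trials_from_events(nb_trials, events):
--     # group-then-scatter: for each distinct class, collect the positions where it
--     # occurs, then write True into a preallocated result at the positions whose
--     # rank within the class is below nb_trials (rank comparison, not slicing)
--     result = [False] * len(events)
--     for e in set(events):
--         idxs = [i for i, x in enumerate(events) if x == e]
--         for rank, pos in enumerate(idxs):
--             if rank < nb_trials:
--                 result[pos] = True
--     return result
-- ===== Notes on version B (the rewrite author's own statement) =====
-- stated objective: alternative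
-- what changed: Instead of A's single left-to-right pass with a mutable per-class counter dict appending booleans, B preallocates an all-False result, groups the occurrence positions of each distinct class, and scatters True at the positions whose rank within the group is below nb_trials (writes are to disjoint positions, so class order is irrelevant).
import Mathlib
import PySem

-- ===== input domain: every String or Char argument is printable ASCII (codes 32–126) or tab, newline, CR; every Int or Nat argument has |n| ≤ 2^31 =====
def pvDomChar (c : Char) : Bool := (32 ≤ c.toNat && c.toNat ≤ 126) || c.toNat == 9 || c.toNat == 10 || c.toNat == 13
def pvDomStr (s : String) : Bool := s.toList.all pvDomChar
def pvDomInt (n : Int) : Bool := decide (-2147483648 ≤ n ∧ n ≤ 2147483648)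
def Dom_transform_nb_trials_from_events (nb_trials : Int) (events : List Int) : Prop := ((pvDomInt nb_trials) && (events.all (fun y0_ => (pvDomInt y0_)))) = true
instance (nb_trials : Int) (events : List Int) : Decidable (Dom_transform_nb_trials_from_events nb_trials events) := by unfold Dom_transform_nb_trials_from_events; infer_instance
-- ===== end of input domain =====

-- B replaces A's single counting pass (mutable per-class counter dict, appending booleans) by a
-- group-then-scatter scheme: preallocate an all-False result, collect each distinct class's
-- occurrence positions, and write True where the rank within the group is below nb_trials;
-- objective: alternative (different algorithm, similar cost).


-- ===== PORT A =====
def transform_nb_trials_from_events (nb_trials : Int) (events : List Int) : List Bool :=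
  -- unique_class = list(set(events))  (only used to seed the dict with zeros: order-independent)
  let unique_class : List Int := PySem.Set.ofList events
  -- {unique_class[i]: 0 for i in range(len(unique_class))}
  let dict0 : PySem.Dict Int Int :=
    (PySem.List.pyRange 0 unique_class.length).foldl
      (fun d i => d.insert (PySem.List.pyGetD unique_class i 0) 0) PySem.Dict.empty
  -- for i in range(len(events)): …
  (((PySem.List.pyRange 0 events.length).foldl
      (fun (st : PySem.Dict Int Int × List Bool) i =>
        let e := PySem.List.pyGetD events i 0
        if st.1.getD e 0 < nb_trials then
          (st.1.insert e (st.1.getD e 0 + 1), st.2 ++ [true])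
        else
          (st.1, st.2 ++ [false]))
      (dict0, []))).2

-- ===== PORT B =====
def transform_nb_trials_from_events_alt (nb_trials : Int) (events : List Int) : List Bool :=
  -- result = [False] * len(events)
  let result0 : List Bool := List.replicate events.length false
  -- for e in set(events): … (writes of different classes are to disjoint positions)
  (PySem.Set.ofList events).foldl
    (fun result e =>
      -- idxs = [i for i, x in enumerate(events) if x == e]
      let idxs : List Int :=
        ((PySem.List.enumerate events).filter (fun p => p.2 == e)).map (fun p => p.1)
      -- for rank, pos in enumerate(idxs): if rank < nb_trials: result[pos] = True
      -- (pos is a nonnegative in-range index, so 'result[pos] = True' is List.set at pos.toNat)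
      (PySem.List.enumerate idxs).foldl
        (fun r q => if q.1 < nb_trials then r.set q.2.toNat true else r) result)
    result0

-- ===== PRECONDITION & SPEC =====
def Spec_transform_nb_trials_from_events (nb_trials : Int) (events : List Int) (out : List Bool) : Prop := out = transform_nb_trials_from_events_alt nb_trials events
instance (nb_trials : Int) (events : List Int) (out : List Bool) : Decidable (Spec_transform_nb_trials_from_events nb_trials events out) := by unfold Spec_transform_nb_trials_from_events; infer_instance

-- ===== CLAIM (what is proved, stated in full; the proofs are below) =====
def Claim_equal_transform_nb_trials_from_events : Prop := ∀ (nb_trials : Int) (events : List Int), Dom_transform_nb_trials_from_events nb_trials events → Spec_transform_nb_trials_from_events nb_trials events (transform_nb_trials_from_events nb_trials events)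

-- ===== LEMMAS AND PROOFS =====

-- Reference value: pvMark nb p s lists, for each element of the suffix s, whether its class has
-- appeared fewer than nb times in everything before it (the processed prefix p).
def pvMark (nb : Int) : List Int → List Int → List Bool
  | _, [] => []
  | p, e :: s => decide ((p.count e : Int) < nb) :: pvMark nb (p ++ [e]) s

-- A dict seeded only with zeros looks up 0 everywhere.
lemma pvDict0_getD (l : List Int) (key : Int → Int) (d : PySem.Dict Int Int)
    (hd : ∀ e, d.getD e 0 = 0) :
    ∀ e, ((l.foldl (fun d i => d.insert (key i) 0) d).getD e 0) = 0 := by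
  induction l generalizing d with
  | nil => exact hd
  | cons i l ih =>
      intro e
      refine ih (d.insert (key i) 0) (fun e' => ?_) e
      rw [PySem.Dict.getD_insert]
      split <;> [rfl; exact hd e']

lemma pvCount_append_self (e : Int) (p : List Int) :
    List.count e (p ++ [e]) = List.count e p + 1 := by simp

lemma pvCount_append_ne (e' e : Int) (p : List Int) (he : e' ≠ e) :
    List.count e' (p ++ [e]) = List.count e' p := by
  simp [List.count_append, Ne.symm he]

-- Invariant of A's loop: the dict stores min(count so far, max nb 0); the booleans emitted are pvMark.
lemma pvLoopA (nb : Int) (events : List Int) :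
    ∀ (s p : List Int) (d : PySem.Dict Int Int) (acc : List Bool),
    events = p ++ s →
    (∀ e, d.getD e 0 = min ((p.count e : Int)) (max nb 0)) →
    (((PySem.List.pyRange (p.length) (events.length)).foldl
      (fun (st : PySem.Dict Int Int × List Bool) i =>
        let e := PySem.List.pyGetD events i 0
        if st.1.getD e 0 < nb then
          (st.1.insert e (st.1.getD e 0 + 1), st.2 ++ [true])
        else
          (st.1, st.2 ++ [false]))
      (d, acc))).2 = acc ++ pvMark nb p s := by
  intro s
  induction s with
  | nil =>
      intro p d acc hev hd
      have hlen : events.length = p.length := by rw [hev]; simp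
      rw [PySem.List.pyRange_one_eq_nil (by exact_mod_cast hlen.le)]
      simp [pvMark]
  | cons e s ih =>
      intro p d acc hev hd
      have hlen : events.length = p.length + s.length + 1 := by rw [hev]; simp; omega
      rw [PySem.List.pyRange_one_cons (by exact_mod_cast (by omega : p.length < events.length))]
      rw [List.foldl_cons]
      have hget : PySem.List.pyGetD events (p.length : Int) 0 = e := by
        rw [PySem.List.pyGetD_natCast, hev, List.getD_eq_getElem?_getD,
            List.getElem?_append_right le_rfl]
        simp
      have hcnt := hd e
      simp only [hget]
      have harg : ((p.length : Int) + 1) = (((p ++ [e]).length : Nat) : Int) := by simp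
      by_cases h : d.getD e 0 < nb
      · rw [if_pos h]
        have hdec : decide (((p.count e : Nat) : Int) < nb) = true := by
          simp only [decide_eq_true_eq]; omega
        have hmark : pvMark nb p (e :: s) = true :: pvMark nb (p ++ [e]) s := by
          simp only [pvMark, hdec]
        rw [hmark, harg,
            ih (p ++ [e]) (d.insert e (d.getD e 0 + 1)) (acc ++ [true])
              (by rw [hev]; simp)
              (by
                intro e'
                rw [PySem.Dict.getD_insert]
                have hde := hd e'
                by_cases he : e' = e
                · subst he
                  rw [if_pos rfl, pvCount_append_self]
                  push_cast
                  omega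
                · rw [if_neg he, pvCount_append_ne _ _ _ he]
                  omega)]
        simp
      · rw [if_neg h]
        have hdec : decide (((p.count e : Nat) : Int) < nb) = false := by
          simp only [decide_eq_false_iff_not, not_lt]; omega
        have hmark : pvMark nb p (e :: s) = false :: pvMark nb (p ++ [e]) s := by
          simp only [pvMark, hdec]
        rw [hmark, harg,
            ih (p ++ [e]) d (acc ++ [false])
              (by rw [hev]; simp)
              (by
                intro e'
                have hde := hd e'
                by_cases he : e' = e
                · subst he
                  rw [pvCount_append_self]
                  push_cast
                  omega
                · rw [pvCount_append_ne _ _ _ he]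
                  omega)]
        simp

-- pvMark pointwise.
lemma pvMark_length (nb : Int) (p s : List Int) : (pvMark nb p s).length = s.length := by
  induction s generalizing p with
  | nil => rfl
  | cons e s ih => simp [pvMark, ih]

lemma pvMark_getElem? (nb : Int) (p s : List Int) (j : Nat) (hj : j < s.length) :
    (pvMark nb p s)[j]? = some (decide ((((p ++ s.take j).count (s.getD j 0) : Nat) : Int) < nb)) := by
  induction s generalizing p j with
  | nil => simp at hj
  | cons e s ih =>
      cases j with
      | zero => simp [pvMark]
      | succ j =>
          have hj' : j < s.length := by simpa using hj
          simp only [pvMark, List.getElem?_cons_succ, List.take_succ_cons, List.getD_cons_succ]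
          rw [ih (p ++ [e]) j hj']
          simp [List.append_assoc]

-- [i for i, x in enumerate(s) if x == e], with offset start: the filtered range, shifted.
lemma pvIdxs (s : List Int) (e : Int) :
    ∀ k : Nat,
      (((PySem.List.enumerate s (k : Int)).filter (fun p => p.2 == e)).map (fun p => p.1))
        = ((List.range s.length).filter (fun i => s.getD i 0 == e)).map (fun i => ((k + i : Nat) : Int)) := by
  induction s with
  | nil => intro k; simp [PySem.List.enumerate_nil]
  | cons x s ih =>
      intro k
      have htail :
          ((PySem.List.enumerate s ((k : Int) + 1)).filter (fun p => p.2 == e)).map (fun p => p.1)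
            = ((List.range s.length).filter (fun i => s.getD i 0 == e)).map
                (fun i => ((k + 1 + i : Nat) : Int)) := by
        have h := ih (k + 1)
        rw [show ((k + 1 : Nat) : Int) = (k : Int) + 1 by push_cast; ring] at h
        exact h
      have hmapfilter :
          List.filter (fun i => (x :: s).getD i 0 == e) (List.map Nat.succ (List.range s.length))
            = List.map Nat.succ (List.filter (fun i => s.getD i 0 == e) (List.range s.length)) := by
        rw [List.filter_map]
        have hp : ((fun i => (x :: s).getD i 0 == e) ∘ Nat.succ) = (fun i => s.getD i 0 == e) := by
          funext i
          simp [Function.comp_def]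
        rw [hp]
      have hmap2 :
          List.map (fun i => ((k + i : Nat) : Int))
              (List.map Nat.succ (List.filter (fun i => s.getD i 0 == e) (List.range s.length)))
            = ((List.range s.length).filter (fun i => s.getD i 0 == e)).map
                (fun i => ((k + 1 + i : Nat) : Int)) := by
        rw [List.map_map]
        apply List.map_congr_left
        intro i _
        simp only [Function.comp_def, Nat.succ_eq_add_one]
        congr 1
        omega
      rw [PySem.List.enumerate_cons, List.length_cons, List.range_succ_eq_map,
          List.filter_cons, List.filter_cons, hmapfilter]
      by_cases hx : x == e
      · simp only [List.getD_cons_zero, hx, if_pos, List.map_cons, htail, hmap2]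
        norm_num
      · simp only [List.getD_cons_zero, hx, Bool.false_eq_true, if_neg, not_false_iff,
          List.map_cons, htail, hmap2]

lemma pvIdxs0 (s : List Int) (e : Int) :
    (((PySem.List.enumerate s).filter (fun p => p.2 == e)).map (fun p => p.1))
      = ((List.range s.length).filter (fun i => s.getD i 0 == e)).map (fun i => ((i : Nat) : Int)) := by
  have h := pvIdxs s e 0
  rw [show ((0 : Nat) : Int) = (0 : Int) by simp] at h
  rw [h]
  apply List.map_congr_left
  intro i _
  norm_num

-- count of e in the first j elements = number of matching indices below j.
lemma pvCountRange (s : List Int) (e : Int) :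
    ∀ j : Nat, j ≤ s.length →
      ((List.range j).filter (fun i => s.getD i 0 == e)).length = (s.take j).count e := by
  intro j
  induction j with
  | zero => intro _; simp
  | succ j ih =>
      intro hj
      have hj' : j < s.length := by omega
      have hget : s[j]? = some (s.getD j 0) := by
        rw [List.getElem?_eq_getElem hj']
        rw [List.getD_eq_getElem?_getD, List.getElem?_eq_getElem hj']
        rfl
      rw [List.range_succ, List.filter_append, List.take_succ, List.length_append,
          ih (by omega), List.count_append, hget]
      simp only [Option.toList_some, List.filter_cons, List.filter_nil]
      by_cases h : (s[j]?.getD 0) = e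
      · simp [h]
      · simp [h, Ne.symm h]

-- rank: the index j sits in its class's occurrence list at position (s.take j).count e.
lemma pvRank (s : List Int) (j : Nat) (hj : j < s.length) :
    (((List.range s.length).filter (fun i => s.getD i 0 == s.getD j 0)).map
        (fun i => ((i : Nat) : Int)))[(s.take j).count (s.getD j 0)]?
      = some ((j : Nat) : Int) := by
  have hr : List.range s.length
      = List.range (j + 1) ++ (List.range (s.length - (j + 1))).map (fun i => (j + 1) + i) := by
    have h2 : List.range ((j + 1) + (s.length - (j + 1)))
        = List.range (j + 1) ++ (List.range (s.length - (j + 1))).map (fun i => (j + 1) + i) :=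
      List.range_add
    rw [show (j + 1) + (s.length - (j + 1)) = s.length by omega] at h2
    exact h2
  have hfj : List.filter (fun i => s.getD i 0 == s.getD j 0) [j] = [j] := by simp
  have hocc : (List.range s.length).filter (fun i => s.getD i 0 == s.getD j 0)
      = (List.range j).filter (fun i => s.getD i 0 == s.getD j 0)
        ++ ([j] ++ ((List.range (s.length - (j + 1))).map (fun i => (j + 1) + i)).filter
              (fun i => s.getD i 0 == s.getD j 0)) := by
    rw [hr, List.filter_append, List.range_succ, List.filter_append, hfj, List.append_assoc]
  have hlen := pvCountRange s (s.getD j 0) j (by omega)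
  rw [List.getElem?_map, hocc,
      List.getElem?_append_right (by rw [hlen]),
      show (s.take j).count (s.getD j 0)
          - ((List.range j).filter (fun i => s.getD i 0 == s.getD j 0)).length = 0 by omega]
  simp

-- Inner scatter loop: length is preserved.
lemma pvInner_length (nb : Int) (l : List Int) :
    ∀ (k0 : Int) (r : List Bool),
      ((PySem.List.enumerate l k0).foldl
        (fun r q => if q.1 < nb then r.set q.2.toNat true else r) r).length = r.length := by
  induction l with
  | nil => intro k0 r; simp [PySem.List.enumerate_nil]
  | cons x l ih =>
      intro k0 r
      rw [PySem.List.enumerate_cons, List.foldl_cons]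
      by_cases h : k0 < nb
      · simp only [h, ite_true, ih, List.length_set]
      · simp only [h, ite_false, ih]

-- Inner scatter loop: positions not in l are untouched.
lemma pvInner_other (nb : Int) (l : List Int) :
    ∀ (k0 : Int) (r : List Bool) (j : Nat), (∀ x ∈ l, 0 ≤ x) → ((j : Nat) : Int) ∉ l →
      ((PySem.List.enumerate l k0).foldl
        (fun r q => if q.1 < nb then r.set q.2.toNat true else r) r)[j]? = r[j]? := by
  induction l with
  | nil => intro k0 r j _ _; simp [PySem.List.enumerate_nil]
  | cons x l ih =>
      intro k0 r j hnn hmem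
      rw [PySem.List.enumerate_cons, List.foldl_cons]
      have hxj : x.toNat ≠ j := by
        intro h
        exact hmem (by
          have hx : 0 ≤ x := hnn x (by simp)
          have : ((j : Nat) : Int) = x := by rw [← h, Int.toNat_of_nonneg hx]
          simp [this])
      have hrest := ih (k0 + 1) (if k0 < nb then r.set x.toNat true else r) j
        (fun y hy => hnn y (by simp [hy])) (fun h => hmem (by simp [h]))
      by_cases h : k0 < nb
      · simp only [h, if_pos] at hrest ⊢
        rw [hrest, List.getElem?_set_ne hxj]
      · simp only [h, ite_false] at hrest ⊢
        exact hrest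

-- Inner scatter loop: the position at rank k ends up decide (k0 + k < nb).
lemma pvInner_mem (nb : Int) (l : List Int) :
    ∀ (k0 : Int) (r : List Bool) (k j : Nat), (∀ x ∈ l, 0 ≤ x) → l.Nodup →
      l[k]? = some ((j : Nat) : Int) → r[j]? = some false →
      ((PySem.List.enumerate l k0).foldl
        (fun r q => if q.1 < nb then r.set q.2.toNat true else r) r)[j]? =
        some (decide (k0 + (k : Int) < nb)) := by
  induction l with
  | nil => intro k0 r k j _ _ hk _; simp at hk
  | cons x l ih =>
      intro k0 r k j hnn hnd hk hr
      rw [PySem.List.enumerate_cons, List.foldl_cons]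
      have hjlen : j < r.length := by
        obtain ⟨h, -⟩ := List.getElem?_eq_some_iff.mp hr
        exact h
      cases k with
      | zero =>
          have hx : x = ((j : Nat) : Int) := by simpa using hk
          have hxT : x.toNat = j := by rw [hx]; simp
          have hnotmem : ((j : Nat) : Int) ∉ l := by
            rw [← hx]; exact (List.nodup_cons.mp hnd).1
          by_cases h : k0 < nb
          · simp only [h, if_pos]
            rw [pvInner_other nb l (k0 + 1) _ j (fun y hy => hnn y (by simp [hy])) hnotmem,
                hxT, List.getElem?_set_self hjlen]
            simp; omega
          · simp only [h, ite_false]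
            rw [pvInner_other nb l (k0 + 1) _ j (fun y hy => hnn y (by simp [hy])) hnotmem, hr]
            simp; omega
      | succ k =>
          have hmem : ((j : Nat) : Int) ∈ l := by
            have hk2 : l[k]? = some ((j : Nat) : Int) := by simpa using hk
            obtain ⟨h, he⟩ := List.getElem?_eq_some_iff.mp hk2
            exact he ▸ List.getElem_mem h
          have hxj : x ≠ ((j : Nat) : Int) := by
            intro h; exact (List.nodup_cons.mp hnd).1 (h ▸ hmem)
          have hxT : x.toNat ≠ j := by
            intro h
            exact hxj (by
              have hx0 : 0 ≤ x := hnn x (by simp)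
              rw [← h, Int.toNat_of_nonneg hx0])
          have hk' : l[k]? = some ((j : Nat) : Int) := by simpa using hk
          have step : ∀ r' : List Bool, r'[j]? = some false →
              ((PySem.List.enumerate l (k0 + 1)).foldl
                (fun r q => if q.1 < nb then r.set q.2.toNat true else r) r')[j]? =
                some (decide (k0 + ((k : Nat) + 1 : Int) < nb)) := by
            intro r' hr'
            rw [ih (k0 + 1) r' k j (fun y hy => hnn y (by simp [hy]))
                (List.nodup_cons.mp hnd).2 hk' hr']
            congr 1
            have : k0 + 1 + (k : Int) = k0 + ((k : Nat) + 1 : Int) := by ring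
            rw [this]
          by_cases h : k0 < nb
          · simp only [h, if_pos]
            rw [step (r.set x.toNat true) (by rw [List.getElem?_set_ne hxT]; exact hr)]
            congr 1
          · simp only [h, ite_false]
            rw [step r hr]
            congr 1
          
-- Membership in a class's index list forces the class.
lemma pvIdxs_mem_class (events : List Int) (e : Int) (j : Nat)
    (h : ((j : Nat) : Int) ∈ (((PySem.List.enumerate events).filter (fun p => p.2 == e)).map (fun p => p.1))) :
    events.getD j 0 = e := by
  rw [pvIdxs0] at h
  obtain ⟨i, hi, hij⟩ := List.mem_map.mp h
  have : i = j := by exact_mod_cast hij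
  subst this
  have := List.of_mem_filter hi
  simpa using this

-- Outer fold over classes: length is preserved.
lemma pvOuter_length (nb : Int) (events : List Int) (ks : List Int) :
    ∀ r : List Bool,
      (ks.foldl
        (fun result e =>
          (PySem.List.enumerate
            (((PySem.List.enumerate events).filter (fun p => p.2 == e)).map (fun p => p.1))).foldl
            (fun r q => if q.1 < nb then r.set q.2.toNat true else r) result)
        r).length = r.length := by
  induction ks with
  | nil => intro r; rfl
  | cons e ks ih => intro r; rw [List.foldl_cons, ih, pvInner_length]

-- Outer fold: classes other than j's never touch j.
lemma pvOuter_preserve (nb : Int) (events : List Int) (j : Nat) (ks : List Int) :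
    ∀ r : List Bool, (∀ e ∈ ks, e ≠ events.getD j 0) →
      (ks.foldl
        (fun result e =>
          (PySem.List.enumerate
            (((PySem.List.enumerate events).filter (fun p => p.2 == e)).map (fun p => p.1))).foldl
            (fun r q => if q.1 < nb then r.set q.2.toNat true else r) result)
        r)[j]? = r[j]? := by
  induction ks with
  | nil => intro r _; rfl
  | cons e ks ih =>
      intro r hne
      rw [List.foldl_cons, ih _ (fun e' he' => hne e' (by simp [he'])),
          pvInner_other nb _ _ _ j ?_ ?_]
      · intro x hx
        rw [pvIdxs0] at hx
        obtain ⟨i, _, hij⟩ := List.mem_map.mp hx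
        omega
      · intro hmem
        exact hne e (by simp) (pvIdxs_mem_class events e j hmem).symm

-- Outer fold: j's own class writes decide (rank < nb), and nothing later disturbs it.
lemma pvOuter_hit (nb : Int) (events : List Int) (j : Nat) (hj : j < events.length) (ks : List Int) :
    ∀ r : List Bool, ks.Nodup → events.getD j 0 ∈ ks → r[j]? = some false →
      (ks.foldl
        (fun result e =>
          (PySem.List.enumerate
            (((PySem.List.enumerate events).filter (fun p => p.2 == e)).map (fun p => p.1))).foldl
            (fun r q => if q.1 < nb then r.set q.2.toNat true else r) result)
        r)[j]? = some (decide ((((events.take j).count (events.getD j 0) : Nat) : Int) < nb)) := by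
  induction ks with
  | nil => intro r _ h _; simp at h
  | cons e ks ih =>
      intro r hnd hmem hr
      rw [List.foldl_cons]
      by_cases he : e = events.getD j 0
      · subst he
        rw [pvOuter_preserve nb events j ks _
            (fun e' he' h' => absurd (h' ▸ he') (List.nodup_cons.mp hnd).1)]
        rw [pvInner_mem nb _ 0 r ((events.take j).count (events.getD j 0)) j ?_ ?_ ?_ hr]
        · norm_num
        · intro x hx
          rw [pvIdxs0] at hx
          obtain ⟨i, hi, hij⟩ := List.mem_map.mp hx
          omega
        · rw [pvIdxs0]
          exact (List.nodup_range.filter _).map (fun a b hab => by exact_mod_cast hab)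
        · rw [pvIdxs0]
          exact pvRank events j hj
      · have hne : ((j : Nat) : Int) ∉
            (((PySem.List.enumerate events).filter (fun p => p.2 == e)).map (fun p => p.1)) := by
          intro h
          exact he (pvIdxs_mem_class events e j h).symm
        rw [ih _ (List.nodup_cons.mp hnd).2 (by
              rcases List.mem_cons.mp hmem with h | h
              · exact absurd h.symm he
              · exact h) (by
              rw [pvInner_other nb _ _ _ j ?_ hne]
              · exact hr
              · intro x hx
                rw [pvIdxs0] at hx
                obtain ⟨i, _, hij⟩ := List.mem_map.mp hx
                omega)]

-- B computes pvMark as well (pointwise, then by extensionality).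
lemma pvAltB (nb : Int) (events : List Int) :
    transform_nb_trials_from_events_alt nb events = pvMark nb [] events := by
  apply List.ext_getElem?
  intro j
  by_cases hj : j < events.length
  · have hmem : events.getD j 0 ∈ PySem.Set.ofList events := by
      rw [PySem.Set.mem_ofList]
      have : events.getD j 0 = events[j] := by
        rw [List.getD_eq_getElem?_getD, List.getElem?_eq_getElem hj]; rfl
      rw [this]
      exact List.getElem_mem hj
    have hB := pvOuter_hit nb events j hj (PySem.Set.ofList events)
      (List.replicate events.length false) (PySem.Set.nodup_ofList events) hmem
      (by rw [List.getElem?_replicate]; simp [hj])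
    unfold transform_nb_trials_from_events_alt
    rw [hB, pvMark_getElem? nb [] events j hj]
    simp
  · have h1 : (transform_nb_trials_from_events_alt nb events)[j]? = none := by
      apply List.getElem?_eq_none
      unfold transform_nb_trials_from_events_alt
      rw [pvOuter_length]
      simp; omega
    have h2 : (pvMark nb [] events)[j]? = none := by
      apply List.getElem?_eq_none
      rw [pvMark_length]; omega
    rw [h1, h2]

-- ===== VERDICT (by name: the statement is the Claim_ definition above) =====
theorem transform_nb_trials_from_events_spec : Claim_equal_transform_nb_trials_from_events := by
  intro nb events _
  unfold Spec_transform_nb_trials_from_events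
  have hz : ∀ e, ((((PySem.List.pyRange 0 ((PySem.Set.ofList events : List Int).length)).foldl
      (fun d i => d.insert (PySem.List.pyGetD (PySem.Set.ofList events : List Int) i 0) 0)
      (PySem.Dict.empty : PySem.Dict Int Int))).getD e 0) = 0 :=
    pvDict0_getD _ _ _ (fun e => by rw [PySem.Dict.getD_empty])
  have hA := pvLoopA nb events events []
      ((PySem.List.pyRange 0 ((PySem.Set.ofList events : List Int).length)).foldl
        (fun d i => d.insert (PySem.List.pyGetD (PySem.Set.ofList events : List Int) i 0) 0)
        (PySem.Dict.empty : PySem.Dict Int Int)) [] rfl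
      (fun e => by rw [hz e]; simp only [List.count_nil, Nat.cast_zero]; omega)
  simp only [List.length_nil, Nat.cast_zero, List.nil_append] at hA
  unfold transform_nb_trials_from_events
  rw [hA, pvAltB]
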